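-- pv_equiv track=rewrite | github.com/R2Boyo25/Raspi-Repair | solution.py | _remVars
-- ===== SOURCE A (Python) =====
-- def _remVars(text):
--
--     started = False
--
--     output = []
--
--     for line in text.split("\n"):
--
--         if line.startswith("{") or started:
--             started = True
--             output.append(line)
--
--     return "\n".join(output)
-- ===== SOURCE B (Python) =====
-- def _remVars(text):
--     # Character-level scan: return the suffix of the raw string starting at the
--     # first '{' that begins a line (index 0 or right after a '\n'); no line splitting.
--     prev = "\n"
--     for i, c in enumerate(text):
--         if c == "{" and prev == "\n":
--             return text[i:]
--         prev = c
--     return ""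
-- ===== Notes on version B (the rewrite author's own statement) =====
-- stated objective: alternative
-- what changed: Instead of splitting into lines and accumulating them under a started flag, B scans the raw character string once and returns the suffix text[i:] at the first '{' found at the start of a line (index 0 or just after a newline), never building a line list or joining.
import Mathlib
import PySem

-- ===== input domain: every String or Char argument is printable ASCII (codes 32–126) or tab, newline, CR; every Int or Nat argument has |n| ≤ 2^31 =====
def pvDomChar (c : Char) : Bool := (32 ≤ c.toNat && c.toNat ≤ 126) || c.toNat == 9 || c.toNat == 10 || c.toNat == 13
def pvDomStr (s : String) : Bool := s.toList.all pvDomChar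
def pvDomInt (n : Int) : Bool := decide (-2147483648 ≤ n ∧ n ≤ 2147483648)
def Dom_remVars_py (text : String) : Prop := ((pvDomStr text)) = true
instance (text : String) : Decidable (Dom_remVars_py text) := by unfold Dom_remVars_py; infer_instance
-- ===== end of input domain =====

-- B scans the raw characters once and returns the suffix at the first '{' that begins a line,
-- instead of A's split-into-lines / started-flag accumulation / join (alternative algorithm, same cost).

-- ===== PORT A =====
def remVars_py (text : String) : String :=
  let lines := (PySem.Str.split? text "\n").getD []
  let st := lines.foldl
    (fun (acc : Bool × List String) line =>
      if PySem.Str.startswith line "{" || acc.1 then (true, acc.2 ++ [line]) else acc)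
    (false, [])
  PySem.Str.join "\n" st.2

-- ===== PORT B =====
-- transcription of B's for-loop: prev starts as '\n'; at the first c = '{' with prev = '\n'
-- return the current suffix (Python's text[i:]); otherwise prev becomes c; '' if the loop ends.
def pvScan : Char → List Char → List Char
  | _, [] => []
  | prev, c :: cs => if c = '{' ∧ prev = '\n' then c :: cs else pvScan c cs

def remVars_py_alt (text : String) : String :=
  String.ofList (pvScan '\n' text.toList)

-- ===== PRECONDITION & SPEC =====
def Spec_remVars_py (text : String) (out : String) : Prop := out = remVars_py_alt text
instance (text : String) (out : String) : Decidable (Spec_remVars_py text out) := by unfold Spec_remVars_py; infer_instance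

-- ===== CLAIM (what is proved, stated in full; the proofs are below) =====
def Claim_equal_remVars_py : Prop := ∀ (text : String), Dom_remVars_py text → Spec_remVars_py text (remVars_py text)

-- ===== LEMMAS AND PROOFS =====

-- A's fold with the started flag is dropWhile of the "does not start with '{'" lines.
theorem pv_fold_started {α : Type} (p : α → Bool) (ls : List α) (acc : List α) :
    ls.foldl
      (fun (acc : Bool × List α) line =>
        if p line || acc.1 then (true, acc.2 ++ [line]) else acc)
      (true, acc) = (true, acc ++ ls) := by
  induction ls generalizing acc with
  | nil => simp
  | cons h t ih =>
    rw [List.foldl_cons]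
    show List.foldl _ (if (p h || true) = true then (true, acc ++ [h]) else (true, acc)) t = _
    rw [Bool.or_true, if_pos rfl, ih]
    simp

theorem pv_fold_main {α : Type} (p : α → Bool) (ls : List α) (acc : List α) :
    (ls.foldl
      (fun (acc : Bool × List α) line =>
        if p line || acc.1 then (true, acc.2 ++ [line]) else acc)
      (false, acc)).2 = acc ++ ls.dropWhile (fun l => !p l) := by
  induction ls generalizing acc with
  | nil => simp
  | cons h t ih =>
    rw [List.foldl_cons]
    show (List.foldl _ (if (p h || false) = true then (true, acc ++ [h]) else (false, acc)) t).2 = _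
    rw [Bool.or_false]
    by_cases hs : p h = true
    · rw [if_pos hs, pv_fold_started]
      simp [hs]
    · rw [if_neg (by simp_all), ih]
      simp only [List.dropWhile_cons]
      simp_all

-- simple split-on-'\n' used to characterise PySem.Chars.splitOn
def pvMapFirst (f : List Char → List Char) : List (List Char) → List (List Char)
  | [] => []
  | x :: xs => f x :: xs

def pvLines : List Char → List (List Char)
  | [] => [[]]
  | c :: rest => if c = '\n' then [] :: pvLines rest else pvMapFirst (fun l => c :: l) (pvLines rest)

theorem pvLines_ne_nil (s : List Char) : pvLines s ≠ [] := by
  cases s with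
  | nil => simp [pvLines]
  | cons c rest =>
    simp only [pvLines]
    split
    · simp
    · cases h : pvLines rest with
      | nil => exact absurd h (pvLines_ne_nil rest)
      | cons x xs => simp [pvMapFirst]

theorem pv_join_cons (sep x : List Char) (c : Char) (xs : List (List Char)) :
    PySem.Chars.join sep ((c :: x) :: xs) = c :: PySem.Chars.join sep (x :: xs) := by
  cases xs with
  | nil => simp [PySem.Chars.join_singleton]
  | cons y ys =>
    rw [PySem.Chars.join_cons_cons, PySem.Chars.join_cons_cons]
    simp [List.append_assoc]

-- round trip: joining the lines of s gives back s
theorem pv_join_pvLines (s : List Char) : PySem.Chars.join ['\n'] (pvLines s) = s := by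
  induction s with
  | nil => simp [pvLines, PySem.Chars.join_singleton]
  | cons c rest ih =>
    simp only [pvLines]
    by_cases hc : c = '\n'
    · rw [if_pos hc]
      cases h : pvLines rest with
      | nil => exact absurd h (pvLines_ne_nil rest)
      | cons x xs =>
        rw [PySem.Chars.join_cons_cons]
        rw [h] at ih
        rw [ih, hc]
        simp
    · rw [if_neg hc]
      cases h : pvLines rest with
      | nil => exact absurd h (pvLines_ne_nil rest)
      | cons x xs =>
        rw [h] at ih
        simp only [pvMapFirst]
        rw [pv_join_cons, ih]

-- PySem.Chars.splitOn.go on sep = ['\n'] with enough fuel computes pvLines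
theorem pv_go_spec (fuel : Nat) (l cur : List Char) (acc : List (List Char))
    (hf : l.length ≤ fuel) :
    PySem.Chars.splitOn.go ['\n'] fuel l cur acc
      = acc.reverse ++ pvMapFirst (fun x => cur.reverse ++ x) (pvLines l) := by
  induction fuel generalizing l cur acc with
  | zero =>
    interval_cases hl : l.length
    · rw [List.length_eq_zero_iff] at hl
      subst hl
      simp [PySem.Chars.splitOn.go, pvLines, pvMapFirst]
  | succ f ih =>
    cases l with
    | nil => simp [PySem.Chars.splitOn.go, pvLines, pvMapFirst]
    | cons c rest =>
      rw [show PySem.Chars.splitOn.go ['\n'] (f+1) (c :: rest) cur acc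
            = if List.isPrefixOf ['\n'] (c :: rest)
              then PySem.Chars.splitOn.go ['\n'] f (List.drop 1 (c :: rest)) [] (cur.reverse :: acc)
              else PySem.Chars.splitOn.go ['\n'] f rest (c :: cur) acc
          from rfl]
      have hrest : rest.length ≤ f := by simpa using hf
      by_cases hc : c = '\n'
      · rw [if_pos (by simp [List.isPrefixOf, hc])]
        simp only [List.drop_succ_cons, List.drop_zero]
        rw [ih rest [] (cur.reverse :: acc) hrest]
        cases h : pvLines rest with
        | nil => exact absurd h (pvLines_ne_nil rest)
        | cons x xs =>
          simp [pvLines, hc, pvMapFirst, h]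
      · rw [if_neg (by simp [List.isPrefixOf]; exact fun h => absurd h.symm hc)]
        rw [ih rest (c :: cur) acc hrest]
        cases h : pvLines rest with
        | nil => exact absurd h (pvLines_ne_nil rest)
        | cons x xs =>
          simp [pvLines, hc, pvMapFirst, h]

theorem pv_splitOn_eq (s : List Char) : PySem.Chars.splitOn s ['\n'] = pvLines s := by
  rw [PySem.Chars.splitOn, pv_go_spec (s.length + 1) s [] [] (by omega)]
  cases h : pvLines s with
  | nil => exact absurd h (pvLines_ne_nil s)
  | cons x xs => simp [pvMapFirst]

-- the line-level predicate on the character level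
def pvP (l : List Char) : Bool := !PySem.Chars.startswith l ['{']

-- the core equivalence: B's scan equals dropWhile-then-join of the lines;
-- the flag prev = '\n' says whether we stand at the beginning of a line.
theorem pv_scan_eq (s : List Char) (prev : Char) :
    pvScan prev s
      = PySem.Chars.join ['\n']
          (List.dropWhile pvP (if prev = '\n' then pvLines s else (pvLines s).tail)) := by
  induction s generalizing prev with
  | nil =>
    by_cases hp : prev = '\n' <;>
      simp [pvScan, hp, pvLines, pvP, PySem.Chars.startswith, List.isPrefixOf,
        PySem.Chars.join_nil]
  | cons c rest ih =>
    by_cases hc : c = '\n'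
    · have hne : ¬ (c = '{' ∧ prev = '\n') := by simp [hc]
      rw [show pvScan prev (c :: rest) = pvScan c rest from by simp [pvScan, hne]]
      rw [ih c]
      rw [if_pos hc]
      by_cases hp : prev = '\n'
      · rw [if_pos hp]
        simp [pvLines, hc, pvP, PySem.Chars.startswith, List.isPrefixOf]
      · rw [if_neg hp]
        simp [pvLines, hc]
    · by_cases hstart : c = '{' ∧ prev = '\n'
      · obtain ⟨hcb, hp⟩ := hstart
        rw [show pvScan prev (c :: rest) = c :: rest from by simp [pvScan, hcb, hp]]
        rw [if_pos hp]
        cases h : pvLines rest with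
        | nil => exact absurd h (pvLines_ne_nil rest)
        | cons x xs =>
          have : pvLines (c :: rest) = (c :: x) :: xs := by simp [pvLines, hc, pvMapFirst, h]
          rw [this]
          have hpfalse : pvP (c :: x) = false := by
            simp [pvP, PySem.Chars.startswith, List.isPrefixOf, hcb]
          rw [List.dropWhile_cons, hpfalse]
          simp only [Bool.false_eq_true, if_false]
          rw [pv_join_cons]
          have := pv_join_pvLines rest
          rw [h] at this
          rw [this]
      · rw [show pvScan prev (c :: rest) = pvScan c rest from by simp [pvScan, hstart]]
        rw [ih c, if_neg hc]
        cases h : pvLines rest with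
        | nil => exact absurd h (pvLines_ne_nil rest)
        | cons x xs =>
          have hl : pvLines (c :: rest) = (c :: x) :: xs := by simp [pvLines, hc, pvMapFirst, h]
          by_cases hp : prev = '\n'
          · rw [if_pos hp, hl]
            have hcb : ¬ c = '{' := fun hcb => hstart ⟨hcb, hp⟩
            have hptrue : pvP (c :: x) = true := by
              simp [pvP, PySem.Chars.startswith, List.isPrefixOf]
              exact fun hh => absurd hh.symm hcb
            rw [List.dropWhile_cons, hptrue]
            simp
          · rw [if_neg hp, hl]
            simp

-- ===== VERDICT (by name: the statement is the Claim_ definition above) =====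
theorem remVars_py_spec : Claim_equal_remVars_py := by
  intro text _
  unfold Spec_remVars_py remVars_py remVars_py_alt
  simp only []
  rw [pv_fold_main]
  simp only [List.nil_append]
  rw [pv_scan_eq text.toList '\n', if_pos rfl]
  -- bridge String-level split/join/startswith to the character level
  rw [show (PySem.Str.split? text "\n").getD []
        = (PySem.Chars.splitOn text.toList ['\n']).map String.ofList from by
      simp [PySem.Str.split?, PySem.Chars.split?]]
  rw [pv_splitOn_eq]
  rw [List.dropWhile_map]
  rw [show ((fun l => !PySem.Str.startswith l "{") ∘ String.ofList) = pvP from by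
      funext l; simp [pvP, PySem.Str.startswith]]
  rw [PySem.Str.join]
  congr 1
  simp [Function.comp_def]
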